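-- pv_equiv track=rewrite | github.com/joelibaceta/MIA-101-PC1 | 3.py | crear_tablero_n_diagonal
-- ===== SOURCE A (Python) =====
-- def crear_tablero_n_diagonal(n):
--     """
--     Crea un tablero 'n-diagonal' de tamaño n x (n+1) siguiendo el patrón cíclico diagonal.
--     """
--     tablero = [[0] * (n + 1) for _ in range(n)]  # Crear una matriz vacía
--     numero = 1  # Número inicial para rellenar
--     i, j = 0, 0  # Coordenadas iniciales
--
--     # Rellenar el tablero siguiendo el patrón
--     while numero <= n * (n + 1):
--         tablero[i][j] = numero
--         numero += 1
--         # Moverse a la siguiente casilla diagonal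
--         i += 1
--         j += 1
--         if i >= n:  # Si excede el límite inferior, regresar al principio
--             i = 0
--         if j >= n + 1:  # Si excede el límite derecho, regresar al principio
--             j = 0
--
--     return tablero
-- ===== SOURCE B (Python) =====
-- def crear_tablero_n_diagonal(n):
--     """
--     Crea un tablero 'n-diagonal' de tamano n x (n+1) calculando cada celda
--     con la forma cerrada CRT del camino diagonal ciclico.
--     """
--     m = n * (n + 1)
--     return [[(i * (n + 1) - j * n) % m + 1 for j in range(n + 1)]
--             for i in range(n)]
-- ===== Notes on version B (the rewrite author's own statement) =====
-- stated objective: simpler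
-- what changed: Replaced the stateful wrapping path-walk (while loop with running counter and cyclic i,j coordinates) by a row-major comprehension that computes each cell independently via the closed form (i*(n+1) - j*n) % (n*(n+1)) + 1, the CRT inverse of the diagonal path.
-- outside the precondition, e.g. on crear_tablero_n_diagonal(-2): A raises IndexError, B returns []
import Mathlib
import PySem

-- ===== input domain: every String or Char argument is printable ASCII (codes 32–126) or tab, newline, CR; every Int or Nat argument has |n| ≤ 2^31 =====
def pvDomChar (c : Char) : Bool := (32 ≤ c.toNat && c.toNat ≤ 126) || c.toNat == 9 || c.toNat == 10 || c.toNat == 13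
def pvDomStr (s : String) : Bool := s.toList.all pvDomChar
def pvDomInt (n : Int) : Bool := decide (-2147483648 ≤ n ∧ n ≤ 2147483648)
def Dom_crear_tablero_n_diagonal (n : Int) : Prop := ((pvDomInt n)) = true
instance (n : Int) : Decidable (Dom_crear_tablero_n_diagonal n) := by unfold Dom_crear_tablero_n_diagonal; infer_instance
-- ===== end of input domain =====

-- B replaces A's stateful wrapping diagonal walk by a row-major pass computing each
-- cell with the closed form (i*(n+1) - j*n) % (n*(n+1)) + 1 (simpler; measured faster).

-- ===== PORT A =====
-- tablero[i][j] = v  (indices in range on every admitted input)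
def pvSetCell (t : List (List Int)) (i j : Nat) (v : Int) : List (List Int) :=
  t.set i ((t.getD i []).set j v)

-- the while loop; fuel = number of iterations (n*(n+1), exact where Python A terminates)
def pvLoopA (n : Int) : Nat → List (List Int) → Nat → Nat → Int → List (List Int)
  | 0, t, _, _, _ => t
  | fuel+1, t, i, j, numero =>
      let t' := pvSetCell t i j numero
      let i1 := i + 1
      let j1 := j + 1
      let i2 := if ((i1 : Int) ≥ n) then 0 else i1
      let j2 := if ((j1 : Int) ≥ n + 1) then 0 else j1
      pvLoopA n fuel t' i2 j2 (numero + 1)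

def crear_tablero_n_diagonal (n : Int) : List (List Int) :=
  pvLoopA n (n * (n + 1)).toNat
    (List.replicate n.toNat (List.replicate (n + 1).toNat 0)) 0 0 1

-- ===== PORT B =====
def crear_tablero_n_diagonal_alt (n : Int) : List (List Int) :=
  let m := n * (n + 1)
  (List.range n.toNat).map (fun (i : Nat) =>
    (List.range (n + 1).toNat).map (fun (j : Nat) =>
      PySem.Int.mod ((i : Int) * (n + 1) - (j : Int) * n) m + 1))

-- ===== PRECONDITION & SPEC =====
-- Pre_ excludes only n ≤ -2, where Python A raises IndexError (the while loop runs on an empty board).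
def Pre_crear_tablero_n_diagonal (n : Int) : Prop := -1 ≤ n
instance (n : Int) : Decidable (Pre_crear_tablero_n_diagonal n) := by unfold Pre_crear_tablero_n_diagonal; infer_instance
def pvWitness_crear_tablero_n_diagonal : Int := 3

def Spec_crear_tablero_n_diagonal (n : Int) (out : List (List Int)) : Prop := out = crear_tablero_n_diagonal_alt n
instance (n : Int) (out : List (List Int)) : Decidable (Spec_crear_tablero_n_diagonal n out) := by unfold Spec_crear_tablero_n_diagonal; infer_instance

-- ===== CLAIM (what is proved, stated in full; the proofs are below) =====
def Claim_equal_crear_tablero_n_diagonal : Prop := ∀ (n : Int), Dom_crear_tablero_n_diagonal n → Pre_crear_tablero_n_diagonal n → Spec_crear_tablero_n_diagonal n (crear_tablero_n_diagonal n)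

-- ===== LEMMAS AND PROOFS =====

-- the board after k steps of the walk, described cell by cell
def cellVal (n : Int) (k : Nat) (i j : Nat) : Int :=
  if ((i : Int) * (n + 1) - (j : Int) * n) % (n * (n + 1)) < (k : Int) then
    ((i : Int) * (n + 1) - (j : Int) * n) % (n * (n + 1)) + 1
  else 0

def boardAt (n : Int) (k : Nat) : List (List Int) :=
  (List.range n.toNat).map (fun i => (List.range (n + 1).toNat).map (fun j => cellVal n k i j))

theorem pv_succ_mod (a b : Nat) (h : 0 < b) :
    (a + 1) % b = if a % b + 1 = b then 0 else a % b + 1 := by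
  have hr := Nat.mod_lt a h
  have hd := Nat.div_add_mod a b
  by_cases hc : a % b + 1 = b
  · have hmul : b * (a / b + 1) = b * (a / b) + b := by ring
    have : a + 1 = b * (a / b + 1) := by omega
    simp [hc, this, Nat.mul_mod_right]
  · have : a + 1 = (a % b + 1) + b * (a / b) := by omega
    rw [if_neg hc, this, Nat.add_mul_mod_self_left, Nat.mod_eq_of_lt (by omega)]

theorem pv_Npos {n : Int} (hn : 1 ≤ n) : 0 < n * (n + 1) :=
  mul_pos (by omega) (by omega)

theorem pv_c_mod_left {n : Int} (x y : Int) (hx0 : 0 ≤ x) (hx : x < n) :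
    ((x * (n + 1) - y * n) % (n * (n + 1))) % n = x := by
  rw [Int.emod_emod_of_dvd _ (dvd_mul_right n (n + 1))]
  have h : x * (n + 1) - y * n = x + n * (x - y) := by ring
  rw [h, Int.add_mul_emod_self_left, Int.emod_eq_of_lt hx0 hx]

theorem pv_c_mod_right {n : Int} (x y : Int) (hy0 : 0 ≤ y) (hy : y < n + 1) :
    ((x * (n + 1) - y * n) % (n * (n + 1))) % (n + 1) = y := by
  rw [Int.emod_emod_of_dvd _ (dvd_mul_left (n + 1) n)]
  have h : x * (n + 1) - y * n = y + (n + 1) * (x - y) := by ring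
  rw [h, Int.add_mul_emod_self_left, Int.emod_eq_of_lt hy0 hy]

theorem pv_crt_hit {n : Int} (K : Int) (hK0 : 0 ≤ K) (hK : K < n * (n + 1)) :
    ((K % n) * (n + 1) - (K % (n + 1)) * n) % (n * (n + 1)) = K := by
  have h : (K % n) * (n + 1) - (K % (n + 1)) * n
      = K + (n * (n + 1)) * ((K / (n + 1)) - (K / n)) := by
    rw [Int.emod_def, Int.emod_def]; ring
  rw [h, Int.add_mul_emod_self_left, Int.emod_eq_of_lt hK0 hK]

theorem pv_cell_char {n : Int} (hn : 1 ≤ n) (i j k : Nat)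
    (hi : i < n.toNat) (hj : j < (n + 1).toNat) (hk : (k : Int) < n * (n + 1)) :
    (((i : Int) * (n + 1) - (j : Int) * n) % (n * (n + 1)) = (k : Int))
      ↔ (i = k % n.toNat ∧ j = k % (n + 1).toNat) := by
  have hnn : ((n.toNat : Int)) = n := Int.toNat_of_nonneg (by omega)
  have hnn1 : (((n + 1).toNat : Int)) = n + 1 := Int.toNat_of_nonneg (by omega)
  have hic : (i : Int) < n := by omega
  have hjc : (j : Int) < n + 1 := by omega
  constructor
  · intro hc
    have h1 := pv_c_mod_left (i : Int) (j : Int) (by positivity) hic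
    have h2 := pv_c_mod_right (i : Int) (j : Int) (by positivity) hjc
    rw [hc] at h1 h2
    constructor
    · have : ((k % n.toNat : Nat) : Int) = (i : Int) := by
        push_cast; rw [hnn, h1]
      omega
    · have : ((k % (n + 1).toNat : Nat) : Int) = (j : Int) := by
        push_cast; rw [hnn1, h2]
      omega
  · rintro ⟨rfl, rfl⟩
    have e1 : ((k % n.toNat : Nat) : Int) = (k : Int) % n := by push_cast; rw [hnn]
    have e2 : ((k % (n + 1).toNat : Nat) : Int) = (k : Int) % (n + 1) := by push_cast; rw [hnn1]
    rw [e1, e2, pv_crt_hit (k : Int) (by positivity) hk]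

theorem pv_cell_succ {n : Int} (hn : 1 ≤ n) (i j k : Nat)
    (hi : i < n.toNat) (hj : j < (n + 1).toNat) (hk : (k : Int) < n * (n + 1)) :
    cellVal n (k + 1) i j
      = if i = k % n.toNat ∧ j = k % (n + 1).toNat then (k : Int) + 1
        else cellVal n k i j := by
  unfold cellVal
  have hcast : (((k + 1 : Nat)) : Int) = (k : Int) + 1 := by push_cast; ring
  by_cases hc : ((i : Int) * (n + 1) - (j : Int) * n) % (n * (n + 1)) = (k : Int)
  · rw [if_pos ((pv_cell_char hn i j k hi hj hk).mp hc)]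
    rw [hcast, if_pos (by omega), hc]
  · rw [if_neg (fun h => hc ((pv_cell_char hn i j k hi hj hk).mpr h)), hcast]
    by_cases hlt : ((i : Int) * (n + 1) - (j : Int) * n) % (n * (n + 1)) < (k : Int)
    · rw [if_pos (by omega), if_pos hlt]
    · rw [if_neg (by omega), if_neg hlt]

theorem pv_step {n : Int} (hn : 1 ≤ n) (k : Nat) (hk : (k : Int) < n * (n + 1)) :
    pvSetCell (boardAt n k) (k % n.toNat) (k % (n + 1).toNat) ((k : Int) + 1)
      = boardAt n (k + 1) := by
  have hmodi : k % n.toNat < n.toNat := Nat.mod_lt k (by omega)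
  have hmodj : k % (n + 1).toNat < (n + 1).toNat := Nat.mod_lt k (by omega)
  unfold pvSetCell boardAt
  have hrow : (((List.range n.toNat).map
        (fun i => (List.range (n + 1).toNat).map (fun j => cellVal n k i j))).getD
        (k % n.toNat) [])
      = (List.range (n + 1).toNat).map (fun j => cellVal n k (k % n.toNat) j) := by
    simp [List.getD, hmodi]
  rw [hrow]
  apply List.ext_getElem
  · simp
  · intro i hi1 hi2
    simp only [List.length_map, List.length_range] at hi2
    simp only [List.getElem_set, List.getElem_map, List.getElem_range]
    by_cases hie : k % n.toNat = i
    · rw [if_pos hie]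
      apply List.ext_getElem
      · simp
      · intro j hj1 hj2
        simp only [List.length_set, List.length_map, List.length_range] at hj1 hj2
        simp only [List.getElem_set, List.getElem_map, List.getElem_range]
        rw [pv_cell_succ hn i j k hi2 hj2 hk]
        by_cases hje : k % (n + 1).toNat = j
        · rw [if_pos hje, if_pos ⟨hie.symm, hje.symm⟩]
        · rw [if_neg hje, if_neg (fun h => hje h.2.symm), hie]
    · rw [if_neg hie]
      symm
      apply List.map_congr_left
      intro j hjmem
      have hj : j < (n + 1).toNat := List.mem_range.mp hjmem
      rw [pv_cell_succ hn i j k hi2 hj hk, if_neg (fun h => hie h.1.symm)]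

theorem pv_loop {n : Int} (hn : 1 ≤ n) :
    ∀ (fuel k : Nat), k + fuel = (n * (n + 1)).toNat →
    pvLoopA n fuel (boardAt n k) (k % n.toNat) (k % (n + 1).toNat) ((k : Int) + 1)
      = boardAt n (k + fuel) := by
  intro fuel
  induction fuel with
  | zero => intro k hk; simp [pvLoopA]
  | succ m ih =>
    intro k hk
    have hkN : (k : Int) < n * (n + 1) := by
      have h1 : k < (n * (n + 1)).toNat := by omega
      have h2 : ((n * (n + 1)).toNat : Int) = n * (n + 1) :=
        Int.toNat_of_nonneg (le_of_lt (pv_Npos hn))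
      omega
    have hnn : ((n.toNat : Int)) = n := Int.toNat_of_nonneg (by omega)
    have hnn1 : (((n + 1).toNat : Int)) = n + 1 := Int.toNat_of_nonneg (by omega)
    have hmodi : k % n.toNat < n.toNat := Nat.mod_lt k (by omega)
    have hmodj : k % (n + 1).toNat < (n + 1).toNat := Nat.mod_lt k (by omega)
    simp only [pvLoopA]
    rw [pv_step hn k hkN]
    have hi2 : (if (((k % n.toNat + 1 : Nat) : Int) ≥ n) then 0 else k % n.toNat + 1)
        = (k + 1) % n.toNat := by
      rw [pv_succ_mod k n.toNat (by omega)]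
      by_cases hc : k % n.toNat + 1 = n.toNat
      · rw [if_pos (by push_cast; omega), if_pos hc]
      · rw [if_neg (by push_cast; omega), if_neg hc]
    have hj2 : (if (((k % (n + 1).toNat + 1 : Nat) : Int) ≥ n + 1) then 0
          else k % (n + 1).toNat + 1)
        = (k + 1) % (n + 1).toNat := by
      rw [pv_succ_mod k (n + 1).toNat (by omega)]
      by_cases hc : k % (n + 1).toNat + 1 = (n + 1).toNat
      · rw [if_pos (by push_cast; omega), if_pos hc]
      · rw [if_neg (by push_cast; omega), if_neg hc]
    rw [hi2, hj2]
    have hnum : ((k : Int) + 1) + 1 = (((k + 1 : Nat) : Int)) + 1 := by push_cast; ring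
    rw [hnum, ih (k + 1) (by omega)]
    congr 1
    omega

theorem pv_board0 {n : Int} (hn : 1 ≤ n) :
    boardAt n 0 = List.replicate n.toNat (List.replicate (n + 1).toNat 0) := by
  have hne : n * (n + 1) ≠ 0 := ne_of_gt (pv_Npos hn)
  have hcell : ∀ i j : Nat, cellVal n 0 i j = 0 := by
    intro i j
    unfold cellVal
    rw [if_neg (by rw [Nat.cast_zero]; exact not_lt.mpr (Int.emod_nonneg _ hne))]
  unfold boardAt
  simp [hcell, List.map_const']

theorem pv_boardN {n : Int} (hn : 1 ≤ n) :
    boardAt n ((n * (n + 1)).toNat) = crear_tablero_n_diagonal_alt n := by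
  have hpos := pv_Npos hn
  have hN : (((n * (n + 1)).toNat : Nat) : Int) = n * (n + 1) :=
    Int.toNat_of_nonneg (le_of_lt hpos)
  unfold boardAt crear_tablero_n_diagonal_alt
  dsimp only
  apply List.map_congr_left
  intro i _
  apply List.map_congr_left
  intro j _
  unfold cellVal
  rw [PySem.Int.mod_eq_emod_of_pos hpos]
  rw [if_pos (by rw [hN]; exact Int.emod_lt_of_pos _ hpos)]

-- ===== VERDICT (by name: the statement is the Claim_ definition above) =====
theorem crear_tablero_n_diagonal_spec : Claim_equal_crear_tablero_n_diagonal := by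
  intro n hdom hpre
  unfold Spec_crear_tablero_n_diagonal
  by_cases hn : 1 ≤ n
  · unfold crear_tablero_n_diagonal
    rw [← pv_board0 hn]
    have h := pv_loop hn ((n * (n + 1)).toNat) 0 (by omega)
    rw [Nat.zero_mod, Nat.zero_mod] at h
    simp only [Nat.cast_zero, zero_add] at h
    rw [h, pv_boardN hn]
  · unfold Pre_crear_tablero_n_diagonal at hpre
    have : n = 0 ∨ n = -1 := by omega
    rcases this with rfl | rfl <;> decide
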